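-- pv_equiv track=rewrite | github.com/GeneTherapyScience/barcode_expression | codes/bin/extractWSN.py | is_wsn
-- ===== SOURCE A (Python) =====
-- def is_wsn(barcode, n):
--     L = 3*n
--     if len(barcode) != L:
--         return False
--     for i in range(L):
--         if i % 3 == 0:
--             if barcode[i] not in {'A', 'T', 'W', 'N'}:
--                 return False
--         elif i % 3 == 1:
--             if barcode[i] not in {'G', 'C', 'S', 'N'}:
--                 return False
--     else:
--         return True
-- ===== SOURCE B (Python) =====
-- def is_wsn(barcode, n):
--     if len(barcode) != 3 * n:
--         return False
--     return set(barcode[0::3]) <= {'A', 'T', 'W', 'N'} and set(barcode[1::3]) <= {'G', 'C', 'S', 'N'}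
-- ===== Notes on version B (the rewrite author's own statement) =====
-- stated objective: alternative
-- what changed: B replaces A's single interleaved index loop with i%3 branching by two strided slices (barcode[0::3], barcode[1::3]) whose distinct characters are each checked by one set-subset test.
import Mathlib
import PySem

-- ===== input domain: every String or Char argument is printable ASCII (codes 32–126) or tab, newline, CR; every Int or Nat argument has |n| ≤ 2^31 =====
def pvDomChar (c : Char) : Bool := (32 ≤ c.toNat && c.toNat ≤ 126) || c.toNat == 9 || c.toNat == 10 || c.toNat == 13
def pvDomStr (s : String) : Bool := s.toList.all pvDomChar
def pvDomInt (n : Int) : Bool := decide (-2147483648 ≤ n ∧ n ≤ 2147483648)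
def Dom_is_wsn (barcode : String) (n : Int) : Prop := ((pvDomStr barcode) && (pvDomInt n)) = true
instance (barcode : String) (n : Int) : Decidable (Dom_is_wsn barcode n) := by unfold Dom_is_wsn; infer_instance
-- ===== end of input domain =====

-- B validates by set algebra over two strided slices (barcode[0::3], barcode[1::3]) instead of
-- A's single indexed loop with i % 3 branching; same cost, a different decomposition.

-- ===== PORT A =====
-- 'for i in range(L): if i%3==0 … elif i%3==1 …; else: return True' — early returns become && via .all
def is_wsn (barcode : String) (n : Int) : Bool :=
  let L := 3 * n
  if (PySem.Str.len barcode) ≠ L then false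
  else
    (PySem.List.pyRange 0 L 1).all fun i =>
      if i % 3 == 0 then
        match PySem.Str.pyGet? barcode i with
        | some c => ['A', 'T', 'W', 'N'].contains c
        | none => false
      else if i % 3 == 1 then
        match PySem.Str.pyGet? barcode i with
        | some c => ['G', 'C', 'S', 'N'].contains c
        | none => false
      else true

-- ===== PORT B =====
-- set(barcode[0::3]) <= {…} and set(barcode[1::3]) <= {…}; the step is the literal 3 ≠ 0,
-- so Str.slice? is always `some` and '.getD ""' is exact (Python raises only on step 0).
def is_wsn_alt (barcode : String) (n : Int) : Bool :=
  if (PySem.Str.len barcode) ≠ 3 * n then false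
  else
    PySem.Set.issubset
      (PySem.Set.ofList ((PySem.Str.slice? barcode (some 0) none 3).getD "").toList)
      (PySem.Set.ofList ['A', 'T', 'W', 'N']) &&
    PySem.Set.issubset
      (PySem.Set.ofList ((PySem.Str.slice? barcode (some 1) none 3).getD "").toList)
      (PySem.Set.ofList ['G', 'C', 'S', 'N'])

-- ===== PRECONDITION & SPEC =====
def Spec_is_wsn (barcode : String) (n : Int) (out : Bool) : Prop := out = is_wsn_alt barcode n
instance (barcode : String) (n : Int) (out : Bool) : Decidable (Spec_is_wsn barcode n out) := by unfold Spec_is_wsn; infer_instance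

-- ===== CLAIM (what is proved, stated in full; the proofs are below) =====
def Claim_equal_is_wsn : Prop := ∀ (barcode : String) (n : Int), Dom_is_wsn barcode n → Spec_is_wsn barcode n (is_wsn barcode n)

-- ===== LEMMAS AND PROOFS =====

-- a String-level bridge: the characters of (s[a::3] or "") are (toList s)[a::3] or []
lemma toList_getD_slice3 (s : String) (a : Int) :
    ((PySem.Str.slice? s (some a) none 3).getD "").toList
      = (PySem.List.slice? s.toList (some a) none 3).getD [] := by
  have h := PySem.Str.slice?_map s (some a) none 3
  rw [PySem.Chars.slice?_eq_listSlice?] at h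
  cases ho : PySem.Str.slice? s (some a) none 3 with
  | none => rw [ho] at h; simp at h; rw [← h]; rfl
  | some w => rw [ho] at h; simp at h; rw [← h]; rfl

-- membership in l[0::3]
lemma mem_slice3_zero (l : List Char) (c : Char) :
    (c ∈ (PySem.List.slice? l (some 0) none 3).getD [])
      ↔ ∃ k : Nat, 3 * k < l.length ∧ l[3 * k]? = some c := by
  simp only [PySem.List.slice?, PySem.List.sliceIndices]
  norm_num
  constructor
  · rintro ⟨a, ha, hget⟩
    have hidx : ((3 : Int) * (a : Int)).toNat = 3 * a := by omega
    rw [hidx] at hget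
    refine ⟨a, ?_, hget⟩
    split at ha
    · next hpos => omega
    · omega
  · rintro ⟨k, hk, hget⟩
    refine ⟨k, ?_, ?_⟩
    · split
      · next => omega
      · next => omega
    · have hidx : ((3 : Int) * (k : Int)).toNat = 3 * k := by omega
      rw [hidx]; exact hget

-- membership in l[1::3]
lemma mem_slice3_one (l : List Char) (c : Char) :
    (c ∈ (PySem.List.slice? l (some 1) none 3).getD [])
      ↔ ∃ k : Nat, 3 * k + 1 < l.length ∧ l[3 * k + 1]? = some c := by
  simp only [PySem.List.slice?, PySem.List.sliceIndices]
  norm_num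
  constructor
  · rintro ⟨a, ha, hget⟩
    split at ha
    · next hlen =>
      have hidx : (min (1 : Int) (l.length : Int) + 3 * (a : Int)).toNat = 3 * a + 1 := by
        omega
      rw [hidx] at hget
      exact ⟨a, by omega, hget⟩
    · omega
  · rintro ⟨k, hk, hget⟩
    refine ⟨k, ?_, ?_⟩
    · split
      · next => omega
      · next => omega
    · have hidx : (min (1 : Int) (l.length : Int) + 3 * (k : Int)).toNat = 3 * k + 1 := by
        omega
      rw [hidx]; exact hget

-- A's per-index body on a Nat index, as a plain proposition
lemma condA_iff (s : String) (k : Nat) (hk : k < s.toList.length) :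
    ((if ((k : Int)) % 3 == 0 then
        match PySem.Str.pyGet? s ((k : Int)) with
        | some c => ['A', 'T', 'W', 'N'].contains c
        | none => false
      else if ((k : Int)) % 3 == 1 then
        match PySem.Str.pyGet? s ((k : Int)) with
        | some c => ['G', 'C', 'S', 'N'].contains c
        | none => false
      else true) = true)
    ↔ ((k % 3 = 0 → s.toList[k]'(hk) ∈ ['A', 'T', 'W', 'N'])
       ∧ (k % 3 = 1 → s.toList[k]'(hk) ∈ ['G', 'C', 'S', 'N'])) := by
  rw [PySem.Str.pyGet?_natCast]
  have hget : s.toList[(k : Nat)]? = some (s.toList[k]'(hk)) := List.getElem?_eq_getElem hk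
  rw [hget]
  have hm : ((k : Int)) % 3 = ((k % 3 : Nat) : Int) := by omega
  have h3 : k % 3 = 0 ∨ k % 3 = 1 ∨ k % 3 = 2 := by omega
  rcases h3 with h | h | h <;> simp [hm, h]

-- ===== VERDICT (by name: the statement is the Claim_ definition above) =====
theorem is_wsn_spec : Claim_equal_is_wsn := by
  intro barcode n _
  unfold Spec_is_wsn is_wsn is_wsn_alt
  dsimp only
  rcases eq_or_ne (PySem.Str.len barcode) (3 * n) with h | h
  · rw [if_neg (fun hh => hh h), if_neg (fun hh => hh h)]
    rw [Bool.eq_iff_iff]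
    have hL : 3 * n = ((barcode.toList.length : Nat) : Int) := by
      rw [← h, PySem.Str.len_eq]
    rw [hL, PySem.List.pyRange_zero_natCast]
    rw [Bool.and_eq_true, PySem.Set.issubset_iff, PySem.Set.issubset_iff]
    simp only [List.all_map, List.all_eq_true, Function.comp]
    constructor
    · intro hall
      constructor
      · intro c hc
        rw [PySem.Set.mem_ofList] at hc ⊢
        rw [toList_getD_slice3, mem_slice3_zero] at hc
        obtain ⟨k, hk, hget⟩ := hc
        have := (condA_iff barcode (3 * k) hk).mp (hall (3 * k) (List.mem_range.mpr hk))
        have hgv : barcode.toList[3 * k]'(hk) = c := by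
          rw [List.getElem?_eq_getElem hk] at hget
          exact Option.some.inj hget
        rw [hgv] at this
        exact this.1 (by omega)
      · intro c hc
        rw [PySem.Set.mem_ofList] at hc ⊢
        rw [toList_getD_slice3, mem_slice3_one] at hc
        obtain ⟨k, hk, hget⟩ := hc
        have := (condA_iff barcode (3 * k + 1) hk).mp
          (hall (3 * k + 1) (List.mem_range.mpr hk))
        have hgv : barcode.toList[3 * k + 1]'(hk) = c := by
          rw [List.getElem?_eq_getElem hk] at hget
          exact Option.some.inj hget
        rw [hgv] at this
        exact this.2 (by omega)
    · rintro ⟨h0, h1⟩ k hkmem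
      have hk : k < barcode.toList.length := List.mem_range.mp hkmem
      rw [condA_iff barcode k hk]
      constructor
      · intro hm
        obtain ⟨j, hj⟩ := Nat.dvd_of_mod_eq_zero hm
        subst hj
        have hlt : 3 * j < barcode.toList.length := hk
        have := h0 (barcode.toList[3 * j]'(hk))
        rw [PySem.Set.mem_ofList, PySem.Set.mem_ofList, toList_getD_slice3,
          mem_slice3_zero] at this
        apply this
        exact ⟨j, hlt, List.getElem?_eq_getElem hlt⟩
      · intro hm
        obtain ⟨j, hj⟩ : ∃ j, k = 3 * j + 1 := ⟨k / 3, by omega⟩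
        subst hj
        have hlt : 3 * j + 1 < barcode.toList.length := hk
        have := h1 (barcode.toList[3 * j + 1]'(hk))
        rw [PySem.Set.mem_ofList, PySem.Set.mem_ofList, toList_getD_slice3,
          mem_slice3_one] at this
        apply this
        exact ⟨j, hlt, List.getElem?_eq_getElem hlt⟩
  · rw [if_pos h, if_pos h]
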